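-- pv_equiv track=rewrite | github.com/cpwoo/CodeTest | programmers/kakao/level4/호텔_방_배정.py | solution
-- ===== SOURCE A (Python) =====
-- def solution(k, room_number):
--     answer = []
--     rooms = {}
--     for num in room_number:
--         n = num
--         visited = [n]
--         while n in rooms:
--             n = rooms[n]
--             visited.append(n)
--         answer.append(n)
--         for v in visited:
--             rooms[v] = n+1
--     return answer
-- ===== SOURCE B (Python) =====
-- def solution(k, room_number):
--     # Each request gets the smallest unoccupied room >= the requested number:
--     # keep just the set of occupied rooms and scan upward to the first free one.
--     occupied = set()
--     answer = []
--     for num in room_number: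
--         r = num
--         while r in occupied:
--             r += 1
--         answer.append(r)
--         occupied.add(r)
--     return answer
-- ===== Notes on version B (the rewrite author's own statement) =====
-- stated objective: simpler
-- what changed: A maintains a redirection dict, walks the pointer chain recording a visited list and rewrites every visited node past the assigned room; B drops the pointer structure entirely: it keeps only the set of occupied rooms and finds each assignment by scanning upward from the request to the first free room (the assignment is provably the smallest free room >= the request).
import Mathlib
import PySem

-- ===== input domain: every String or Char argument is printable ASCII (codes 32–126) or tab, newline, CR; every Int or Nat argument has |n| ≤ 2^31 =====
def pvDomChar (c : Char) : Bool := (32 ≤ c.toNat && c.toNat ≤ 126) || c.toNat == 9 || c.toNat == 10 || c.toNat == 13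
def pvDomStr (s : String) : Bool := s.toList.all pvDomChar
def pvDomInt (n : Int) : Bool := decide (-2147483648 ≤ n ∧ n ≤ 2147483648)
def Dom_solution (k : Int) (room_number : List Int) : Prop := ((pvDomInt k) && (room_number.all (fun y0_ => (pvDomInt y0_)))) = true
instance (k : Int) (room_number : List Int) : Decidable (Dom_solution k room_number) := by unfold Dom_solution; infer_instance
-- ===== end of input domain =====

-- B drops A's redirection dict: it keeps only the set of occupied rooms and scans
-- upward from each request to the first free room; objective: simpler.

-- ===== PORT A =====
-- A's while loop `while n in rooms: n = rooms[n]; visited.append(n)` run on fuel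
-- rooms.size+1; the proofs below show every entry of rooms maps a key to a larger
-- value, so the chain visits distinct keys and the fuel is never exhausted.
def chaseA (d : PySem.Dict Int Int) : Nat → Int → List Int → Int × List Int
  | 0, n, visited => (n, visited)
  | fuel+1, n, visited =>
    match d.get? n with
    | none => (n, visited)
    | some m => chaseA d fuel m (visited ++ [m])

def stepA (st : List Int × PySem.Dict Int Int) (num : Int) : List Int × PySem.Dict Int Int :=
  let r := chaseA st.2 (st.2.size + 1) num [num]
  (st.1 ++ [r.1], r.2.foldl (fun d v => d.insert v (r.1 + 1)) st.2)

def solution (k : Int) (room_number : List Int) : List Int :=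
  (room_number.foldl stepA ([], PySem.Dict.empty)).1

-- ===== PORT B =====
-- B's while loop `while r in occupied: r += 1` run on fuel len(occupied)+1; the
-- proofs below show the scan meets a free room after at most len(occupied)
-- occupied ones, so the fuel is never exhausted.
def scanB (occ : PySem.Set Int) : Nat → Int → Int
  | 0, r => r
  | fuel+1, r => if PySem.Set.contains occ r then scanB occ fuel (r + 1) else r

def stepB (st : List Int × PySem.Set Int) (num : Int) : List Int × PySem.Set Int :=
  let r := scanB st.2 (st.2.length + 1) num
  (st.1 ++ [r], PySem.Set.add st.2 r)

def solution_alt (k : Int) (room_number : List Int) : List Int :=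
  (room_number.foldl stepB ([], PySem.Set.empty)).1

-- ===== PRECONDITION & SPEC =====
def Spec_solution (k : Int) (room_number : List Int) (out : List Int) : Prop := out = solution_alt k room_number
instance (k : Int) (room_number : List Int) (out : List Int) : Decidable (Spec_solution k room_number out) := by unfold Spec_solution; infer_instance

-- ===== CLAIM (what is proved, stated in full; the proofs are below) =====
def Claim_equal_solution : Prop := ∀ (k : Int) (room_number : List Int), Dom_solution k room_number → Spec_solution k room_number (solution k room_number)

-- ===== LEMMAS AND PROOFS =====

-- the pure chain walk (no visited list): the value A's loop computes
def chase (d : PySem.Dict Int Int) : Nat → Int → Int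
  | 0, x => x
  | fuel+1, x =>
    match d.get? x with
    | none => x
    | some m => chase d fuel m

-- resolution of x in d: the first free room reached from x
def res (d : PySem.Dict Int Int) (x : Int) : Int := chase d (d.size + 1) x

-- invariant of A's room dict: every entry maps a key to a larger value, keys unique
def Good (d : PySem.Dict Int Int) : Prop := (∀ p ∈ d.items, p.1 < p.2) ∧ d.keys.Nodup

-- A's dict has no gaps: everything between x and its resolution is occupied
def NoGap (d : PySem.Dict Int Int) : Prop := ∀ x y : Int, x ≤ y → y < res d x → y ∈ d.keys

-- termination measure on a list: number of elements ≥ x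
def cntL (l : List Int) (x : Int) : Nat := (l.filter (fun k => decide (x ≤ k))).length

def cnt (d : PySem.Dict Int Int) (x : Int) : Nat := cntL d.keys x

lemma size_eq_keys_length (d : PySem.Dict Int Int) : d.size = d.keys.length := by
  simp [PySem.Dict.size, PySem.Dict.keys]

lemma cnt_le_size (d : PySem.Dict Int Int) (x : Int) : cnt d x ≤ d.size := by
  rw [size_eq_keys_length]; exact List.length_filter_le _ _

lemma good_lt {d : PySem.Dict Int Int} {x m : Int} (hg : Good d) (h : d.get? x = some m) : x < m :=
  hg.1 (x, m) (PySem.Dict.mem_items_of_get?_eq_some d h)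

lemma mem_keys_of_get?_some {d : PySem.Dict Int Int} {x m : Int} (h : d.get? x = some m) : x ∈ d.keys := by
  by_contra hx
  rw [(PySem.Dict.get?_eq_none_iff_not_mem_keys d x).2 hx] at h
  cases h

lemma cntL_lt {l : List Int} {x m : Int} (hx : x ∈ l) (hlt : x < m) :
    cntL l m < cntL l x := by
  unfold cntL
  have hfun : (fun k => decide (m ≤ k)) = (fun k : Int => decide (m ≤ k) && decide (x ≤ k)) := by
    funext a; by_cases h1 : m ≤ a <;> by_cases h2 : x ≤ a <;> simp [h1, h2] <;> omega
  rw [hfun, ← List.filter_filter]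
  apply List.length_filter_lt_length_iff_exists.2
  exact ⟨x, List.mem_filter.2 ⟨hx, by simp⟩, by simp; omega⟩

lemma cnt_lt {d : PySem.Dict Int Int} {x m : Int} (hx : x ∈ d.keys) (hlt : x < m) :
    cnt d m < cnt d x := cntL_lt hx hlt

lemma chase_stable {d : PySem.Dict Int Int} (hg : Good d) :
    ∀ (f g : Nat) (x : Int), cnt d x + 1 ≤ f → cnt d x + 1 ≤ g → chase d f x = chase d g x := by
  intro f
  induction f with
  | zero => intro g x hf _; omega
  | succ f ih =>
    intro g x hf hgle
    cases g with
    | zero => omega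
    | succ g =>
      simp only [chase]
      cases hget : d.get? x with
      | none => rfl
      | some m =>
        have hlt := cnt_lt (d := d) (mem_keys_of_get?_some hget) (good_lt hg hget)
        exact ih g m (by omega) (by omega)

lemma res_of_none {d : PySem.Dict Int Int} {x : Int} (h : d.get? x = none) : res d x = x := by
  unfold res; simp [chase, h]

lemma res_of_some {d : PySem.Dict Int Int} {x m : Int} (hg : Good d) (h : d.get? x = some m) :
    res d x = res d m := by
  unfold res
  have h1 : chase d (d.size + 1) x = chase d (cnt d x + 1) x :=
    chase_stable hg _ _ _ (by have := cnt_le_size d x; omega) le_rfl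
  rw [h1]
  simp only [chase, h]
  have hlt := cnt_lt (d := d) (mem_keys_of_get?_some h) (good_lt hg h)
  exact chase_stable hg (cnt d x) (d.size + 1) m (by omega) (by have := cnt_le_size d m; omega)

lemma chase_ge {d : PySem.Dict Int Int} (hg : Good d) : ∀ (f : Nat) (x : Int), x ≤ chase d f x := by
  intro f
  induction f with
  | zero => intro x; exact le_rfl
  | succ f ih =>
    intro x
    simp only [chase]
    cases hget : d.get? x with
    | none => exact le_rfl
    | some m => exact le_trans (le_of_lt (good_lt hg hget)) (ih m)

lemma res_ge {d : PySem.Dict Int Int} (hg : Good d) (x : Int) : x ≤ res d x := chase_ge hg _ x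

lemma chase_root {d : PySem.Dict Int Int} (hg : Good d) :
    ∀ (f : Nat) (x : Int), cnt d x + 1 ≤ f → d.get? (chase d f x) = none := by
  intro f
  induction f with
  | zero => intro x hf; omega
  | succ f ih =>
    intro x hf
    simp only [chase]
    cases hget : d.get? x with
    | none => exact hget
    | some m =>
      have hlt := cnt_lt (d := d) (mem_keys_of_get?_some hget) (good_lt hg hget)
      exact ih m (by omega)

lemma res_root {d : PySem.Dict Int Int} (hg : Good d) (x : Int) : d.get? (res d x) = none :=
  chase_root hg _ x (by have := cnt_le_size d x; omega)

lemma foldl_insert_const_get? :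
    ∀ (V : List Int) (d : PySem.Dict Int Int) (x c : Int),
      (V.foldl (fun d v => d.insert v c) d).get? x = if x ∈ V then some c else d.get? x := by
  intro V
  induction V with
  | nil => intro d x c; simp
  | cons v V ih =>
    intro d x c
    simp only [List.foldl_cons]
    rw [ih]
    by_cases hv : x ∈ V
    · simp [hv, List.mem_cons]
    · rw [if_neg hv, PySem.Dict.get?_insert]
      by_cases hxv : x = v <;> simp [hxv, hv, List.mem_cons]

lemma mem_keys_foldl_insert (V : List Int) (d : PySem.Dict Int Int) (c x : Int) :
    x ∈ (V.foldl (fun d v => d.insert v c) d).keys ↔ x ∈ V ∨ x ∈ d.keys := by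
  by_cases hxV : x ∈ V
  · constructor
    · intro _; exact Or.inl hxV
    · intro _
      by_contra hxk
      have h0 := (PySem.Dict.get?_eq_none_iff_not_mem_keys _ x).2 hxk
      rw [foldl_insert_const_get?, if_pos hxV] at h0
      cases h0
  · constructor
    · intro hx
      right
      by_contra hxd
      have h0 : (V.foldl (fun d v => d.insert v c) d).get? x = none := by
        rw [foldl_insert_const_get?, if_neg hxV, (PySem.Dict.get?_eq_none_iff_not_mem_keys d x).2 hxd]
      exact ((PySem.Dict.get?_eq_none_iff_not_mem_keys _ x).1 h0) hx
    · intro hx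
      rcases hx with hx | hx
      · exact absurd hx hxV
      · by_contra hxk
        have h0 := (PySem.Dict.get?_eq_none_iff_not_mem_keys _ x).2 hxk
        rw [foldl_insert_const_get?, if_neg hxV] at h0
        exact ((PySem.Dict.get?_eq_none_iff_not_mem_keys d x).1 h0) hx

lemma res_A_update {d : PySem.Dict Int Int} {n : Int} (V : List Int) (hg : Good d)
    (hn : d.get? n = none) (hnV : n ∈ V) (hres : ∀ v ∈ V, res d v = n) :
    Good (V.foldl (fun d v => d.insert v (n + 1)) d) ∧
      ∀ x, res (V.foldl (fun d v => d.insert v (n + 1)) d) x =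
        if res d x = n then res d (n + 1) else res d x := by
  have hget' : ∀ x, (V.foldl (fun d v => d.insert v (n + 1)) d).get? x
      = if x ∈ V then some (n + 1) else d.get? x := fun x => foldl_insert_const_get? V d x (n + 1)
  have hnd' : (V.foldl (fun d v => d.insert v (n + 1)) d).keys.Nodup :=
    PySem.Dict.nodup_keys_foldl_insert V (fun _ _ => n + 1) d hg.2
  have hvle : ∀ v ∈ V, v ≤ n := fun v hv => (hres v hv) ▸ res_ge hg v
  have hgood' : Good (V.foldl (fun d v => d.insert v (n + 1)) d) := by
    refine ⟨?_, hnd'⟩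
    intro p hp
    have hgp := PySem.Dict.get?_of_mem_items _ hp hnd'
    rw [hget'] at hgp
    by_cases hpV : p.1 ∈ V
    · rw [if_pos hpV] at hgp
      have h1 := hvle p.1 hpV
      have h2 : n + 1 = p.2 := Option.some.inj hgp
      omega
    · rw [if_neg hpV] at hgp
      exact good_lt hg hgp
  have hmain : ∀ (f : Nat) (x : Int), cnt (V.foldl (fun d v => d.insert v (n + 1)) d) x + 1 ≤ f →
      chase (V.foldl (fun d v => d.insert v (n + 1)) d) f x
        = if res d x = n then res d (n + 1) else res d x := by
    intro f
    induction f with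
    | zero => intro x hf; omega
    | succ f ih =>
      intro x hf
      by_cases hxV : x ∈ V
      · have hx' : (V.foldl (fun d v => d.insert v (n + 1)) d).get? x = some (n + 1) := by
          rw [hget', if_pos hxV]
        have hxk' : x ∈ (V.foldl (fun d v => d.insert v (n + 1)) d).keys :=
          (mem_keys_foldl_insert V d (n + 1) x).2 (Or.inl hxV)
        have hlt : cnt (V.foldl (fun d v => d.insert v (n + 1)) d) (n + 1)
            < cnt (V.foldl (fun d v => d.insert v (n + 1)) d) x :=
          cnt_lt hxk' (by have := hvle x hxV; omega)
        simp only [chase, hx']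
        rw [ih (n + 1) (by omega)]
        have hge : n + 1 ≤ res d (n + 1) := res_ge hg _
        rw [if_neg (by omega), if_pos (hres x hxV)]
      · cases hget : d.get? x with
        | none =>
          have hx' : (V.foldl (fun d v => d.insert v (n + 1)) d).get? x = none := by
            rw [hget', if_neg hxV, hget]
          have hxn : x ≠ n := fun h => hxV (h ▸ hnV)
          simp only [chase, hx']
          rw [res_of_none hget, if_neg hxn]
        | some m =>
          have hx' : (V.foldl (fun d v => d.insert v (n + 1)) d).get? x = some m := by
            rw [hget', if_neg hxV, hget]
          have hxk' : x ∈ (V.foldl (fun d v => d.insert v (n + 1)) d).keys :=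
            (mem_keys_foldl_insert V d (n + 1) x).2 (Or.inr (mem_keys_of_get?_some hget))
          have hlt : cnt (V.foldl (fun d v => d.insert v (n + 1)) d) m
              < cnt (V.foldl (fun d v => d.insert v (n + 1)) d) x :=
            cnt_lt hxk' (good_lt hg hget)
          simp only [chase, hx']
          rw [ih m (by omega), res_of_some hg hget]
  refine ⟨hgood', fun x => ?_⟩
  exact hmain _ x (by have := cnt_le_size (V.foldl (fun d v => d.insert v (n + 1)) d) x; omega)

lemma chaseA_fst (d : PySem.Dict Int Int) :
    ∀ (f : Nat) (n : Int) (vis : List Int), (chaseA d f n vis).1 = chase d f n := by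
  intro f
  induction f with
  | zero => intro n vis; rfl
  | succ f ih =>
    intro n vis
    cases hget : d.get? n with
    | none => simp only [chaseA, chase, hget]
    | some m => simp only [chaseA, chase, hget]; exact ih m (vis ++ [m])

lemma chaseA_mem {d : PySem.Dict Int Int} (hg : Good d) :
    ∀ (f : Nat) (n : Int) (vis : List Int) (v : Int), cnt d n + 1 ≤ f →
      v ∈ (chaseA d f n vis).2 → v ∈ vis ∨ res d v = res d n := by
  intro f
  induction f with
  | zero => intro n vis v hf; omega
  | succ f ih =>
    intro n vis v hf hv
    revert hv
    cases hget : d.get? n with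
    | none => simp only [chaseA, hget]; exact fun h => Or.inl h
    | some m =>
      simp only [chaseA, hget]
      intro hv
      have hlt := cnt_lt (d := d) (mem_keys_of_get?_some hget) (good_lt hg hget)
      rcases ih m (vis ++ [m]) v (by omega) hv with h | h
      · rcases List.mem_append.1 h with h | h
        · exact Or.inl h
        · right
          have hvm : v = m := by simpa using h
          rw [hvm]
          exact (res_of_some hg hget).symm
      · right
        rw [h]
        exact (res_of_some hg hget).symm

lemma chaseA_root_mem {d : PySem.Dict Int Int} (hg : Good d) :
    ∀ (f : Nat) (n : Int) (vis : List Int), cnt d n + 1 ≤ f → n ∈ vis →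
      (chaseA d f n vis).1 ∈ (chaseA d f n vis).2 := by
  intro f
  induction f with
  | zero => intro n vis hf; omega
  | succ f ih =>
    intro n vis hf hn
    cases hget : d.get? n with
    | none => simp only [chaseA, hget]; exact hn
    | some m =>
      simp only [chaseA, hget]
      have hlt := cnt_lt (d := d) (mem_keys_of_get?_some hget) (good_lt hg hget)
      exact ih m (vis ++ [m]) (by omega) (List.mem_append.2 (Or.inr (List.mem_singleton.2 rfl)))

-- every visited node is in the starting list, a key, or the root itself
lemma chaseA_visited {d : PySem.Dict Int Int} (hg : Good d) :
    ∀ (f : Nat) (u : Int) (vis : List Int), cnt d u + 1 ≤ f →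
      ∀ v ∈ (chaseA d f u vis).2, v ∈ vis ∨ v ∈ d.keys ∨ v = res d u := by
  intro f
  induction f with
  | zero => intro u vis hf; omega
  | succ f ih =>
    intro u vis hf v hv
    revert hv
    cases hget : d.get? u with
    | none => simp only [chaseA, hget]; exact fun h => Or.inl h
    | some m =>
      simp only [chaseA, hget]
      intro hv
      have hlt := cnt_lt (d := d) (mem_keys_of_get?_some hget) (good_lt hg hget)
      rcases ih m (vis ++ [m]) (by omega) v hv with h | h | h
      · rcases List.mem_append.1 h with h | h
        · exact Or.inl h
        · have hvm : v = m := by simpa using h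
          cases hgm : d.get? m with
          | none =>
            right; right
            rw [hvm, res_of_some hg hget, res_of_none hgm]
          | some g =>
            right; left
            rw [hvm]; exact mem_keys_of_get?_some hgm
      · exact Or.inr (Or.inl h)
      · right; right
        rw [h, res_of_some hg hget]

-- B's scan reaches the first free room t when [r, t) is occupied and t is not
lemma scanB_eq (occ : PySem.Set Int) :
    ∀ (fuel : Nat) (r t : Int), cntL occ r + 1 ≤ fuel → r ≤ t → t ∉ occ →
      (∀ y : Int, r ≤ y → y < t → y ∈ occ) → scanB occ fuel r = t := by
  intro fuel
  induction fuel with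
  | zero => intro r t hf; omega
  | succ fuel ih =>
    intro r t hf hrt ht hdense
    by_cases hrt' : r = t
    · subst hrt'
      have hc : PySem.Set.contains occ r = false := by
        cases hb : PySem.Set.contains occ r
        · rfl
        · exact absurd ((PySem.Set.contains_iff occ r).1 hb) ht
      simp only [scanB, hc]; rfl
    · have hrlt : r < t := lt_of_le_of_ne hrt hrt'
      have hrocc : r ∈ occ := hdense r le_rfl hrlt
      have hc : PySem.Set.contains occ r = true := (PySem.Set.contains_iff occ r).2 hrocc
      simp only [scanB, hc, if_true]
      have hcnt : cntL occ (r + 1) < cntL occ r := cntL_lt hrocc (by omega)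
      exact ih (r + 1) t (by omega) (by omega) ht (fun y h1 h2 => hdense y (by omega) h2)

lemma main_inv :
    ∀ (l ans : List Int) (dA : PySem.Dict Int Int) (S : PySem.Set Int),
      Good dA → NoGap dA → (∀ x, x ∈ dA.keys ↔ x ∈ S) →
      (l.foldl stepA (ans, dA)).1 = (l.foldl stepB (ans, S)).1 := by
  intro l
  induction l with
  | nil => intro ans dA S _ _ _; rfl
  | cons num l ih =>
    intro ans dA S hgA hdA hmem
    simp only [List.foldl_cons, stepA, stepB]
    have hfA : cnt dA num + 1 ≤ dA.size + 1 := by have := cnt_le_size dA num; omega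
    have h1 : (chaseA dA (dA.size + 1) num [num]).1 = res dA num := chaseA_fst dA _ num [num]
    set n := res dA num with hn
    have hrootA : dA.get? n = none := res_root hgA num
    have hnS : n ∉ S := fun h =>
      ((PySem.Dict.get?_eq_none_iff_not_mem_keys dA n).1 hrootA) ((hmem n).2 h)
    -- B's scan computes n
    have hB : scanB S (S.length + 1) num = n := by
      apply scanB_eq S (S.length + 1) num n
        (by have : cntL S num ≤ S.length := List.length_filter_le _ _; omega)
        (res_ge hgA num) hnS
      intro y h1' h2'
      exact (hmem y).1 (hdA num y h1' h2')
    -- A's update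
    have hVmem : ∀ v ∈ (chaseA dA (dA.size + 1) num [num]).2, res dA v = n := by
      intro v hv
      rcases chaseA_mem hgA _ num [num] v hfA hv with h | h
      · have hv' : v = num := by simpa using h
        rw [hv']
      · exact h
    have hnV : n ∈ (chaseA dA (dA.size + 1) num [num]).2 := by
      have h0 := chaseA_root_mem hgA _ num [num] hfA (List.mem_singleton.2 rfl)
      rwa [h1] at h0
    obtain ⟨hgA', hFA⟩ := res_A_update (chaseA dA (dA.size + 1) num [num]).2 hgA hrootA hnV hVmem
    -- keys of the new A-dict ↔ members of the new B-set
    have hVsub : ∀ v ∈ (chaseA dA (dA.size + 1) num [num]).2, v ∈ dA.keys ∨ v = n := by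
      intro v hv
      rcases chaseA_visited hgA _ num [num] hfA v hv with h | h | h
      · have hv' : v = num := by simpa using h
        cases hgnum : dA.get? num with
        | none => right; rw [hv', hn, res_of_none hgnum]
        | some m => left; rw [hv']; exact mem_keys_of_get?_some hgnum
      · exact Or.inl h
      · exact Or.inr h
    have hmem' : ∀ x, x ∈ ((chaseA dA (dA.size + 1) num [num]).2.foldl
        (fun d v => d.insert v (n + 1)) dA).keys ↔ x ∈ PySem.Set.add S n := by
      intro x
      rw [mem_keys_foldl_insert, PySem.Set.mem_add, ← hmem x]
      constructor
      · intro h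
        rcases h with h | h
        · rcases hVsub x h with h' | h'
          · exact Or.inl h'
          · exact Or.inr h'
        · exact Or.inl h
      · intro h
        rcases h with h | h
        · exact Or.inr h
        · exact Or.inl (h ▸ hnV)
    -- density of the new A-dict
    have hdA' : NoGap ((chaseA dA (dA.size + 1) num [num]).2.foldl
        (fun d v => d.insert v (n + 1)) dA) := by
      intro x y hxy hy
      rw [hFA x] at hy
      rw [mem_keys_foldl_insert]
      by_cases hx : res dA x = n
      · rw [if_pos hx] at hy
        rcases lt_trichotomy y n with h | h | h
        · exact Or.inr (hdA x y hxy (by omega))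
        · exact Or.inl (h ▸ hnV)
        · exact Or.inr (hdA (n + 1) y (by omega) hy)
      · rw [if_neg hx] at hy
        exact Or.inr (hdA x y hxy hy)
    rw [h1, hB]
    exact ih (ans ++ [n]) _ _ hgA' hdA' hmem'

-- ===== VERDICT (by name: the statement is the Claim_ definition above) =====
theorem solution_spec : Claim_equal_solution := by
  intro k rn _
  unfold Spec_solution solution solution_alt
  refine main_inv rn [] PySem.Dict.empty PySem.Set.empty
    ⟨?_, PySem.Dict.nodup_keys_empty⟩ ?_ ?_
  · intro p hp; simp [PySem.Dict.empty] at hp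
  · intro x y hxy hy
    rw [show res PySem.Dict.empty x = x from res_of_none rfl] at hy
    omega
  · intro x
    simp [PySem.Dict.empty, PySem.Dict.keys, PySem.Set.empty]
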